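-- pv_equiv track=rewrite | github.com/FluxIX/Advent-of-Code | 2016/1/solution.py | compute_offset
-- ===== SOURCE A (Python) =====
-- class Directions:
--    North = 0
--    East = 1
--    South = 2
--    West = 3
--    Count = 4
--
-- def get_moves( s ):
--    return list( map( lambda x: ( x[ 0 ], int( x[ 1 : ] ) ), map( lambda x: x.strip().upper(), s.split( "," ) ) ) )
--
-- def compute_offset( s, starting_direction = Directions.North ):
--    moves = get_moves( s )
--
--    orientation = Directions.North
--    offsets = [ 0, 0 ]
--
--    for index, move in enumerate( moves ):
--       direction, quantity = move
--
--       if direction == "L":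
--          orientation = ( orientation - 1 + Directions.Count ) % Directions.Count
--       elif direction == "R":
--          orientation = ( orientation + 1 ) % Directions.Count
--
--       if orientation == Directions.East:
--          offsets[ 0 ] += quantity
--       elif orientation == Directions.West:
--          offsets[ 0 ] -= quantity
--       elif orientation == Directions.North:
--          offsets[ 1 ] += quantity
--       elif orientation == Directions.South:
--          offsets[ 1 ] -= quantity
--
--    if starting_direction == Directions.East or starting_direction == Directions.West:
--       offsets = [ offsets[ 1 ], offsets[ 0 ] ]
--
--    return offsets
-- ===== SOURCE B (Python) =====
-- class Directions:
--    North = 0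
--    East = 1
--    South = 2
--    West = 3
--    Count = 4
--
-- def get_moves( s ):
--    return list( map( lambda x: ( x[ 0 ], int( x[ 1 : ] ) ), map( lambda x: x.strip().upper(), s.split( "," ) ) ) )
--
-- def compute_offset( s, starting_direction = Directions.North ):
--    # heading vector instead of an orientation index: North = (0, 1)
--    dx, dy = 0, 1
--    x, y = 0, 0
--    for direction, quantity in get_moves( s ):
--       if direction == "L":
--          dx, dy = -dy, dx
--       elif direction == "R":
--          dx, dy = dy, -dx
--       x += quantity * dx
--       y += quantity * dy
--    if starting_direction == Directions.East or starting_direction == Directions.West: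
--       return [ y, x ]
--    return [ x, y ]
-- ===== Notes on version B (the rewrite author's own statement) =====
-- stated objective: idiomatic
-- what changed: Replaces the 4-way integer orientation index and its modular-arithmetic turn updates plus the four-branch offset switch by a heading vector (dx,dy) rotated on L/R, accumulating x += q*dx, y += q*dy in one step.
import Mathlib
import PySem

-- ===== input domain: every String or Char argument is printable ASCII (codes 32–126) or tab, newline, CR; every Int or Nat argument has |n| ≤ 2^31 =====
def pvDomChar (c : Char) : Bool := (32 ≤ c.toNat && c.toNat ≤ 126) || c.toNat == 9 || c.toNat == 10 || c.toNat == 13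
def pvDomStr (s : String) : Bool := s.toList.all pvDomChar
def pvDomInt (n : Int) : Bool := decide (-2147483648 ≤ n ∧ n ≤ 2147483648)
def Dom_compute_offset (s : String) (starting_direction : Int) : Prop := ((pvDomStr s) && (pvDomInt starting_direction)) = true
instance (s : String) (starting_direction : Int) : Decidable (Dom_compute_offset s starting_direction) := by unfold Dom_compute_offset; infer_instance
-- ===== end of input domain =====

-- B replaces A's integer orientation index (mod-4 turns + four-branch offset switch)
-- by a heading vector (dx,dy) rotated on L/R with x += q*dx, y += q*dy (objective: idiomatic).

-- ===== PORT A =====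
-- get_moves, shared verbatim by both Python versions: split on ",", strip+upper each piece,
-- head char paired with int of the rest; none models the IndexError/ValueError on a bad piece.
def parse_move (t : String) : Option (Char × Int) :=
  let u := PySem.Str.upper (PySem.Str.strip t)
  match PySem.Str.pyGet? u 0, PySem.Int.ofStr? (PySem.Str.slice u (some 1) none) with
  | some c, some n => some (c, n)
  | _, _ => none

def get_moves (s : String) : Option (List (Char × Int)) :=
  ((PySem.Str.split? s ",").getD []).mapM parse_move

-- one iteration of A's for-loop: state = (orientation, offsets[0], offsets[1])
def stepA (st : Int × Int × Int) (m : Char × Int) : Int × Int × Int :=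
  let o := if m.1 = 'L' then PySem.Int.mod (st.1 - 1 + 4) 4
           else if m.1 = 'R' then PySem.Int.mod (st.1 + 1) 4
           else st.1
  if o = 1 then (o, st.2.1 + m.2, st.2.2)
  else if o = 3 then (o, st.2.1 - m.2, st.2.2)
  else if o = 0 then (o, st.2.1, st.2.2 + m.2)
  else if o = 2 then (o, st.2.1, st.2.2 - m.2)
  else (o, st.2.1, st.2.2)

def compute_offset (s : String) (starting_direction : Int) : List Int :=
  match get_moves s with
  | none => []  -- Python raises here; excluded by Pre_compute_offset
  | some moves =>
    let r := moves.foldl stepA (0, 0, 0)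
    if starting_direction = 1 ∨ starting_direction = 3 then [r.2.2, r.2.1]
    else [r.2.1, r.2.2]

-- ===== PORT B =====
-- one iteration of B's loop: state = (dx, dy, x, y)
def stepB (st : Int × Int × Int × Int) (m : Char × Int) : Int × Int × Int × Int :=
  let d : Int × Int := if m.1 = 'L' then (-st.2.1, st.1)
                       else if m.1 = 'R' then (st.2.1, -st.1)
                       else (st.1, st.2.1)
  (d.1, d.2, st.2.2.1 + m.2 * d.1, st.2.2.2 + m.2 * d.2)

def compute_offset_alt (s : String) (starting_direction : Int) : List Int :=
  match get_moves s with
  | none => []  -- Python raises here; excluded by Pre_compute_offset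
  | some moves =>
    let r := moves.foldl stepB (0, 1, 0, 0)
    if starting_direction = 1 ∨ starting_direction = 3 then [r.2.2.2, r.2.2.1]
    else [r.2.2.1, r.2.2.2]

-- ===== PRECONDITION & SPEC =====
-- Pre_ excludes exactly the inputs where Python A raises: a comma piece that after
-- strip().upper() is empty (IndexError on x[0]) or whose tail is not int()-parsable (ValueError).
def Pre_compute_offset (s : String) (starting_direction : Int) : Prop :=
  (((PySem.Str.split? s ",").getD []).all (fun t =>
    let u := PySem.Str.upper (PySem.Str.strip t)
    u ≠ "" && (PySem.Int.ofStr? (PySem.Str.slice u (some 1) none)).isSome)) = true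
instance (s : String) (starting_direction : Int) : Decidable (Pre_compute_offset s starting_direction) := by
  unfold Pre_compute_offset; infer_instance

def pvWitness_compute_offset : String × Int := ("R2, L3", 0)

def Spec_compute_offset (s : String) (starting_direction : Int) (out : List Int) : Prop := out = compute_offset_alt s starting_direction
instance (s : String) (starting_direction : Int) (out : List Int) : Decidable (Spec_compute_offset s starting_direction out) := by unfold Spec_compute_offset; infer_instance

-- ===== CLAIM (what is proved, stated in full; the proofs are below) =====
def Claim_equal_compute_offset : Prop := ∀ (s : String) (starting_direction : Int), Dom_compute_offset s starting_direction → Pre_compute_offset s starting_direction → Spec_compute_offset s starting_direction (compute_offset s starting_direction)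

-- ===== LEMMAS AND PROOFS =====

-- heading vector corresponding to an orientation index
def dirvec (o : Int) : Int × Int :=
  if o = 0 then (0, 1) else if o = 1 then (1, 0) else if o = 2 then (0, -1) else (-1, 0)

lemma step_eq (o x y : Int) (m : Char × Int)
    (ho : o = 0 ∨ o = 1 ∨ o = 2 ∨ o = 3) :
    stepB ((dirvec o).1, (dirvec o).2, x, y) m =
      ((dirvec (stepA (o, x, y) m).1).1, (dirvec (stepA (o, x, y) m).1).2,
       (stepA (o, x, y) m).2.1, (stepA (o, x, y) m).2.2) := by
  obtain ⟨c, q⟩ := m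
  rcases ho with h | h | h | h <;> subst h <;>
    by_cases hL : c = 'L' <;> by_cases hR : c = 'R' <;>
      simp [stepA, stepB, dirvec, hL, hR, PySem.Int.mod] <;> ring

lemma fold_eq (ms : List (Char × Int)) :
    ∀ (o x y : Int), (o = 0 ∨ o = 1 ∨ o = 2 ∨ o = 3) →
      ms.foldl stepB ((dirvec o).1, (dirvec o).2, x, y) =
        ((dirvec (ms.foldl stepA (o, x, y)).1).1, (dirvec (ms.foldl stepA (o, x, y)).1).2,
         (ms.foldl stepA (o, x, y)).2.1, (ms.foldl stepA (o, x, y)).2.2) := by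
  induction ms with
  | nil => intro o x y _; rfl
  | cons m rest ih =>
    intro o x y ho
    have ho' : (stepA (o, x, y) m).1 = 0 ∨ (stepA (o, x, y) m).1 = 1 ∨
        (stepA (o, x, y) m).1 = 2 ∨ (stepA (o, x, y) m).1 = 3 := by
      obtain ⟨c, q⟩ := m
      rcases ho with h | h | h | h <;> subst h <;>
        by_cases hL : c = 'L' <;> by_cases hR : c = 'R' <;>
          simp [stepA, hL, hR, PySem.Int.mod]
    have h1 := step_eq o x y m ho
    have h2 := ih (stepA (o, x, y) m).1 (stepA (o, x, y) m).2.1 (stepA (o, x, y) m).2.2 ho'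
    simp only [List.foldl_cons, h1]
    simpa using h2

-- ===== VERDICT (by name: the statement is the Claim_ definition above) =====
theorem compute_offset_spec : Claim_equal_compute_offset := by
  intro s sd _ _
  unfold Spec_compute_offset compute_offset compute_offset_alt
  cases hm : get_moves s with
  | none => rfl
  | some moves =>
    have h := fold_eq moves 0 0 0 (Or.inl rfl)
    norm_num [dirvec] at h
    dsimp only
    rw [h]
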